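-- pv_equiv track=rewrite | github.com/MahmoudKMaarouf/ECE143-Final-Project | py Files/Extra_Analysis.py | getCoordinatesFromDict
-- ===== SOURCE A (Python) =====
-- def getCoordinatesFromDict(data_labels,data_dict):
--     '''
--     Gets coordinates for plotting using animated data
--     '''
--     plotData = []
--     for i in range(len(data_labels)):
--         iter = 0
--         points = []
--         for key in data_dict.keys():
--             if (iter > 96):             #Blocks off incomplete month due to end of data
--                 break
--             points.append([iter,data_dict[key][i]])
--             iter +=1
--         plotData.append(points)
--     return plotData
-- ===== SOURCE B (Python) =====
-- def getCoordinatesFromDict(data_labels, data_dict):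
--     '''
--     Gets coordinates for plotting using animated data
--     '''
--     L = len(data_labels)
--     grid = [[[j, v] for v in row[:L]]
--             for j, row in enumerate(list(data_dict.values())[:97])]
--     if not grid:
--         return [[] for _ in range(L)]
--     return [list(col) for col in zip(*grid)]
-- ===== Notes on version B (the rewrite author's own statement) =====
-- stated objective: alternative
-- what changed: Instead of A's label-major double scan with a manual counter and break (one dict pass and one dict lookup per label), B builds the key-major point grid once from the first 97 dict values and then matrix-transposes it with zip(*grid), so the per-label lists fall out of a transpose rather than repeated scans.
import Mathlib
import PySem

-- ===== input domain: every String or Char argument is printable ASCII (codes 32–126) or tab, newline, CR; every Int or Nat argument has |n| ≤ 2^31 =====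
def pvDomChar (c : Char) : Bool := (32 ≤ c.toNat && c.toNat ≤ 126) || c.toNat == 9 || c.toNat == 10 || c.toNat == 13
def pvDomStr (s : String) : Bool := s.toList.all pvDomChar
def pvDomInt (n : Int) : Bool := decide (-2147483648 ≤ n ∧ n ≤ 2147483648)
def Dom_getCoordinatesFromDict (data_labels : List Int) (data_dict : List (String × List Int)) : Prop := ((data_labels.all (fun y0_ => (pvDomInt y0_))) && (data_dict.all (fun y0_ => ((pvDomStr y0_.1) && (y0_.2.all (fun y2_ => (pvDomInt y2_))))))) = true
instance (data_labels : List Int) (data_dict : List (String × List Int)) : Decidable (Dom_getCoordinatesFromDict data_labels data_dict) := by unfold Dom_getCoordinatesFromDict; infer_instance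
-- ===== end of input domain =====

-- B replaces A's label-major double scan (one dict pass + one lookup per label) by building the
-- key-major point grid once from the first 97 dict values and transposing it (alternative algorithm).


-- ===== PORT A =====
-- inner loop of A: 'for key in data_dict.keys(): if iter > 96: break; points.append([iter, data_dict[key][i]]); iter += 1'
-- (data_dict[key] = Dict.getD; [i] in-range by Pre_, List.getD covers it there)
def pvA_points (d : PySem.Dict String (List Int)) (i : Nat) : List String → Int → List (List Int)
  | [], _ => []
  | k :: ks, iter =>
    if iter > 96 then []
    else [iter, (d.getD k []).getD i 0] :: pvA_points d i ks (iter + 1)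

def getCoordinatesFromDict (data_labels : List Int) (data_dict : List (String × List Int)) : List (List (List Int)) :=
  let d := PySem.Dict.ofList data_dict
  (List.range data_labels.length).foldl
    (fun plotData i => plotData ++ [pvA_points d i d.keys 0]) []

-- ===== PORT B =====
-- zip(*grid): repeatedly take the heads of all rows until some row is exhausted; the fuel
-- (length of the first row) only bounds the recursion, the 'all nonempty' test is zip's stop rule
def pvZip (fuel : Nat) (rows : List (List (List Int))) : List (List (List Int)) :=
  match fuel with
  | 0 => []
  | fuel + 1 =>
    if rows.all (fun r => !r.isEmpty) then
      rows.map (fun r => r.headD []) :: pvZip fuel (rows.map List.tail)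
    else []

def getCoordinatesFromDict_alt (data_labels : List Int) (data_dict : List (String × List Int)) : List (List (List Int)) :=
  let d := PySem.Dict.ofList data_dict
  let L := data_labels.length
  -- grid = [[[j, v] for v in row[:L]] for j, row in enumerate(list(data_dict.values())[:97])]
  let grid := (d.values.take 97).zipIdx.map
      (fun p => (p.1.take L).map (fun v => [(p.2 : Int), v]))
  if grid.isEmpty then data_labels.map (fun _ => [])
  else pvZip (grid.headD []).length grid

-- ===== PRECONDITION & SPEC =====
-- Pre_ excludes exactly the inputs where A raises IndexError: some of the first 97 dict rows
-- shorter than data_labels (when data_labels is nonempty).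
def Pre_getCoordinatesFromDict (data_labels : List Int) (data_dict : List (String × List Int)) : Prop :=
  data_labels = [] ∨ ∀ p ∈ ((PySem.Dict.ofList data_dict).items).take 97, data_labels.length ≤ p.2.length
instance (data_labels : List Int) (data_dict : List (String × List Int)) : Decidable (Pre_getCoordinatesFromDict data_labels data_dict) := by unfold Pre_getCoordinatesFromDict; infer_instance
def pvWitness_getCoordinatesFromDict : List Int × (List (String × List Int)) := ([1], [("a", [5])])
def Spec_getCoordinatesFromDict (data_labels : List Int) (data_dict : List (String × List Int)) (out : List (List (List Int))) : Prop := out = getCoordinatesFromDict_alt data_labels data_dict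
instance (data_labels : List Int) (data_dict : List (String × List Int)) (out : List (List (List Int))) : Decidable (Spec_getCoordinatesFromDict data_labels data_dict out) := by unfold Spec_getCoordinatesFromDict; infer_instance

-- ===== CLAIM (what is proved, stated in full; the proofs are below) =====
def Claim_equal_getCoordinatesFromDict : Prop := ∀ (data_labels : List Int) (data_dict : List (String × List Int)), Dom_getCoordinatesFromDict data_labels data_dict → Pre_getCoordinatesFromDict data_labels data_dict → Spec_getCoordinatesFromDict data_labels data_dict (getCoordinatesFromDict data_labels data_dict)

-- ===== LEMMAS AND PROOFS =====

-- A's outer loop: foldl-append is map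
theorem pv_foldl_append_map {α β : Type} (f : α → β) :
    ∀ (l : List α) (acc : List β), l.foldl (fun a i => a ++ [f i]) acc = acc ++ l.map f := by
  intro l
  induction l with
  | nil => intro acc; simp
  | cons x xs ih => intro acc; simp [List.foldl, ih]

-- A's inner loop equals a map over the enumerated first (97 - n) keys
theorem pvA_points_eq (d : PySem.Dict String (List Int)) (i : Nat) :
    ∀ (ks : List String) (n : Nat), n ≤ 97 →
      pvA_points d i ks (n : Int) =
        ((ks.take (97 - n)).zipIdx n).map (fun p => [(p.2 : Int), (d.getD p.1 []).getD i 0]) := by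
  intro ks
  induction ks with
  | nil => intro n _; simp [pvA_points]
  | cons k t ih =>
    intro n hn
    by_cases h97 : n = 97
    · subst h97
      simp [pvA_points]
    · have hlt : n < 97 := lt_of_le_of_ne hn h97
      have hgt : ¬ ((n : Int) > 96) := by omega
      have htake : 97 - n = (97 - (n + 1)) + 1 := by omega
      rw [htake]
      have := ih (n + 1) (by omega)
      push_cast at this
      simp only [pvA_points, hgt, if_false, List.take_succ_cons, List.zipIdx_cons, List.map_cons]
      rw [this, show 97 - (n+1) = 96 - n from by omega]

-- pvZip of a rectangular grid (all rows of length L) is the list of its L columns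
theorem pvZip_rect :
    ∀ (L : Nat) (grid : List (List (List Int))), (∀ r ∈ grid, r.length = L) →
      pvZip L grid = (List.range L).map (fun i => grid.map (fun r => r.getD i [])) := by
  intro L
  induction L with
  | zero => intro grid _; simp [pvZip]
  | succ L ih =>
    intro grid hrect
    have hne : grid.all (fun r => !r.isEmpty) = true := by
      simp only [List.all_eq_true]
      intro r hr
      have := hrect r hr
      cases r with
      | nil => simp at this
      | cons a t => simp
    have htails : ∀ r ∈ grid.map List.tail, r.length = L := by
      intro r hr
      rcases List.mem_map.mp hr with ⟨s, hs, rfl⟩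
      have := hrect s hs
      simp [List.length_tail, this]
    rw [pvZip, if_pos hne, ih _ htails, List.range_succ_eq_map]
    simp only [List.map_cons, List.map_map]
    congr 1
    · apply List.map_congr_left
      intro r hr
      have := hrect r hr
      cases r with
      | nil => simp at this
      | cons a t => rfl
    · apply List.map_congr_left
      intro i _
      simp only [Function.comp]
      apply List.map_congr_left
      intro r hr
      have := hrect r hr
      cases r with
      | nil => simp at this
      | cons a t => rfl

-- zipIdx over a mapped list
theorem pv_zipIdx_map {α β : Type} (f : α → β) (l : List α) :
    (l.map f).zipIdx = l.zipIdx.map (fun p => (f p.1, p.2)) := by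
  rw [List.zipIdx_map]
  rfl

theorem getCoordinatesFromDict_eq (data_labels : List Int) (data_dict : List (String × List Int))
    (hpre : Pre_getCoordinatesFromDict data_labels data_dict) :
    getCoordinatesFromDict data_labels data_dict = getCoordinatesFromDict_alt data_labels data_dict := by
  unfold getCoordinatesFromDict getCoordinatesFromDict_alt
  set d := PySem.Dict.ofList data_dict with hd
  set L := data_labels.length with hL
  set items97 := d.items.take 97 with hitems
  have hkeys : d.keys.take 97 = items97.map Prod.fst := by
    rw [hitems, List.map_take]; rfl
  have hvals : d.values.take 97 = items97.map Prod.snd := by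
    rw [hitems, List.map_take]; rfl
  have hrowlen : ∀ q ∈ items97, data_labels = [] ∨ L ≤ q.2.length := by
    intro q hq
    rcases hpre with h | h
    · exact Or.inl h
    · exact Or.inr (h q hq)
  rw [pv_foldl_append_map]
  simp only [List.nil_append]
  set grid := ((d.values.take 97).zipIdx.map
      (fun p => (p.1.take L).map (fun v => ([(p.2 : Int), v] : List Int)))) with hgrid
  have hgrid' : grid = items97.zipIdx.map
      (fun p => (p.1.2.take L).map (fun v => ([(p.2 : Int), v] : List Int))) := by
    rw [hgrid, hvals, pv_zipIdx_map, List.map_map]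
    exact List.map_congr_left (fun p _ => rfl)
  have hrect : ∀ r ∈ grid, r.length = L := by
    intro r hr
    rw [hgrid'] at hr
    rcases List.mem_map.mp hr with ⟨p, hp, rfl⟩
    have hq := hrowlen p.1 (List.fst_mem_of_mem_zipIdx hp)
    rcases hq with h0 | hle
    · simp [h0, hL]
    · simp [List.length_take]
      omega
  have hAcols : ∀ i < L,
      pvA_points d i d.keys 0 = grid.map (fun r => r.getD i []) := by
    intro i hi
    have h0 : pvA_points d i d.keys ((0 : Nat) : Int) =
        ((d.keys.take (97 - 0)).zipIdx 0).map (fun p => [(p.2 : Int), (d.getD p.1 []).getD i 0]) :=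
      pvA_points_eq d i d.keys 0 (by omega)
    simp only [Nat.cast_zero, Nat.sub_zero] at h0
    rw [h0, hkeys, pv_zipIdx_map, List.map_map, hgrid', List.map_map]
    apply List.map_congr_left
    intro p hp
    have hmem : p.1 ∈ items97 := List.fst_mem_of_mem_zipIdx hp
    have hmem' : p.1 ∈ d.items := List.mem_of_mem_take hmem
    have hmem'' : (p.1.1, p.1.2) ∈ d.items := hmem'
    have hgetd : d.getD p.1.1 [] = p.1.2 :=
      PySem.Dict.getD_of_mem_items d hmem'' (PySem.Dict.nodup_keys_ofList data_dict) []
    have hlen : L ≤ p.1.2.length := by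
      rcases hrowlen p.1 hmem with h0' | h
      · exfalso; rw [hL, h0'] at hi; simp at hi
      · exact h
    have hit : i < (p.1.2.take L).length := by simp [List.length_take]; omega
    simp only [Function.comp_apply, hgetd]
    simp only [List.getD_eq_getElem?_getD, List.getElem?_map, List.getElem?_eq_getElem hit,
        List.getElem?_eq_getElem (show i < p.1.2.length by omega),
        Option.map_some, Option.getD_some, List.getElem_take]
  by_cases hemp : grid.isEmpty
  · have hkeysnil : d.keys = [] := by
      rw [hgrid', List.isEmpty_iff, List.map_eq_nil_iff, List.zipIdx_eq_nil_iff] at hemp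
      have : d.items = [] := by
        rw [hitems] at hemp
        rcases List.take_eq_nil_iff.mp hemp with h | h
        · omega
        · exact h
      show d.items.map Prod.fst = []
      rw [this]; rfl
    rw [if_pos hemp, hkeysnil]
    have : ∀ i, pvA_points d i ([] : List String) 0 = [] := by intro i; rfl
    simp only [this]
    simp [List.map_const']
    exact hL
  · rw [if_neg hemp]
    have hhead : (grid.headD []).length = L := by
      cases hg : grid with
      | nil => rw [hg] at hemp; simp at hemp
      | cons r t =>
        have : r ∈ grid := by rw [hg]; exact List.mem_cons_self
        simpa using hrect r this
    rw [hhead, pvZip_rect L grid hrect]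
    apply List.map_congr_left
    intro i hi
    exact hAcols i (List.mem_range.mp hi)

-- ===== VERDICT (by name: the statement is the Claim_ definition above) =====
theorem getCoordinatesFromDict_spec : Claim_equal_getCoordinatesFromDict := by
  intro data_labels data_dict _ hpre
  unfold Spec_getCoordinatesFromDict
  exact getCoordinatesFromDict_eq data_labels data_dict hpre
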